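/-
  THE ARENA LAYER AT WORK (Vorbis/Arena.lean, Vorbis/ArenaShadow.lean): each structure used the way a worker will.
      (a) a check site from a SHAPE clause (`A.Block p n`) and an index bound; the allocator's own check sites
      (b) FRAME: `ArenaOK` / `ADO` carried over a store that does not touch `*f`; a setup block kept by a store into another block
      (c) from the machine's tests to `A.Fits n`: FIX A's guard, the rounding, the compiled exact-fit test
      (d) `setup_malloc` end to end: both layers for the final memory of the walk
      (e) the LIFO discipline of start_decoder's pairs P1–P3 (I6 §4.4): three allocations, three releases, the same arena again
      (f) decode time: ADO → `temp_alloc` → a store into the block → `temp_alloc_restore` → ADO, the same arena and live list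
      (g) `vorbis_init` (P3), `vorbis_alloc` (P5), the error state (SD.ERR)
-/
import Vorbis.ArenaShadow
namespace Vorbis.ArenaTest
open X86 X86.User Asan Vorbis

variable {A : Arena} {others : List Obj} {mem : Mem} {f : Nat} {frames : List (Nat × FrameLayout)} {top : Nat}

/-! ### (a) Check sites -/

/-- CB0 as Q4 will state it: `f->codebooks` is a setup block of `2120 * count` bytes. The check of `&f->codebooks[i].entries`. -/
example (h : ArenaOK A others mem f) (hsh : ShadowInv others frames top mem) (count i : Nat) (hi : i < count)
    (hCB0 : A.Block (stb_vorbis.codebooks mem f) (Off.sizeof.Codebook * count)) :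
    AccessibleSmall mem (stb_vorbis.codebooks_at mem f i + Off.Codebook.entries) 4 := by
  apply h.block_acc_inv hsh hCB0
  · simp only [vacc, voff]
    omega
  · simp only [vacc, voff]
    have : 2120 * i + 2120 ≤ 2120 * count := by omega
    omega
  · omega

/-- The same through `Block.live`, the form every SHAPE clause of the decoder layer has (`acc_of_obj` of Vorbis/Fields.lean). -/
example (h : ArenaOK A others mem f) (hsh : ShadowInv others frames top mem) (p n k : Nat) (hb : A.Block p n) (hk : 4 * k + 4 ≤ n) :
    AccessibleSmall mem (p + 4 * k) 4 :=
  acc_of_obj hsh.shadow.covers (h.block_live_inv hsh hb) (Nat.le_add_right _ _) (by simp only; omega) (by omega)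

/-- The allocator's own check sites lie in `*f` (OB1): `__asan_load4_noabort(&f->temp_offset)`. -/
example (Live : Nat → Prop) (hc : Covers Live mem) (hOB1 : (Block.mk f Off.sizeof.stb_vorbis).live Live) :
    AccessibleSmall mem (f + Off.stb_vorbis.temp_offset) 4 :=
  acc_of_field hc hOB1 Off.stb_vorbis.temp_offset 4 (by simp only [voff]; omega) (by omega)

/-- What the loads of the allocator put into the registers: `mov r14d, [rbx + 0x84]` with `rbx = f` leaves the number `T`. -/
example (h : ArenaOK A others mem f) : Word.ofBV (BitVec.ofNat 32 (mem.readLE (addr f + 132) 4)) = addr A.T := by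
  simp only [vfield]
  rw [h.u32_temp]

/-- The `malloc` arm is dead: `test r12, r12 ; je` with `r12 = f->alloc.alloc_buffer`. -/
example (h : ArenaOK A others mem f) : mem.u64 (f + 112) ≠ 0 :=
  h.buffer_ne_zero

/-- A block returned by an allocator is not NULL, is 8-aligned, and lies in the data space. -/
example (h : ArenaOK A others mem f) (p n : Nat) (hb : A.Block p n) : p ≠ 0 ∧ p % 8 = 0 ∧ p + n ≤ 0xC00000 :=
  ⟨h.block_ne_zero hb, (h.block_range hb).1, (h.block_off hb).2.1⟩

/-! ### (b) Frame -/

/-- A store into a setup block `q` while `f` is the stack object `&p`: `ArenaOK` is kept (only AR5 reads memory). -/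
example (h : ArenaOK A others mem f) (hf : 0x700000 ≤ f ∧ f + 1808 ≤ 0x800000) (h8 : 0x800000 ≤ A.B) (q m a v : Nat)
    (hq : A.Block q m) (ha : q ≤ a ∧ a + 4 ≤ q + m) : ArenaOK A others (mem.writeLE (addr a) 4 v) f := by
  have hr := h.block_range hq
  have ho := h.block_off hq
  have ea : (addr a).toNat = a := toNat_addr a (by omega)
  apply h.frame (by simp only [voff]; omega)
  simp only [voff]
  exact Mem.EqOn.writeLE _ _ mem (addr a) 4 v (by omega) (by omega)

/-- `f` is the arena copy (a setup block of 1808 bytes): a store into ANOTHER setup block keeps `ADO`. -/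
example (h : ADO A others mem f) (hf : A.Block f Off.sizeof.stb_vorbis) (q m a v : Nat) (hq : A.Block q m) (hne : q ≠ f)
    (ha : (Block.mk q m).contains a 4) : ADO A others (mem.writeLE (addr a) 4 v) f := by
  have hfo := h.ok.block_off hf
  have hqo := h.ok.block_off hq
  simp only [voff] at hfo
  apply h.frame (by simp only [voff]; omega)
  exact Block.Same.of_writeLE mem a 4 v (h.ok.block_disjoint hf hq (fun e => hne e.symm)) ha (by simp only; omega)

/-- `setups_permanent`: a SHAPE clause established before later allocations still holds after them, and the block is still live. -/
example {A' : Arena} {others' : List Obj} {mem' : Mem} (h' : ArenaOK A' others' mem' f)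
    (hsh' : ShadowInv others' frames top mem') (hext : A.Extends A') (p n : Nat) (hb : A.Block p n) :
    (Block.mk p n).live (Live (stackObjs frames ++ others')) :=
  h'.block_live_inv hsh' (hb.mono hext)

/-- `setups_permanent`, the contents: a later `setup_malloc` / `setup_temp_malloc` with `f` on the stack writes `*f`, its own stack
frame and shadow bytes (its footprint); a setup block reads the same afterwards. -/
example (h : ArenaOK A others mem f) {mem' : Mem} (p n : Nat) (hb : A.Block p n) (ws : List Span)
    (hs : Mem.SameExcept ws mem mem')
    (hws : ∀ w, w ∈ ws → (0x700000 ≤ w.lo ∧ w.hi ≤ 0x800000) ∨ 0xC00000 ≤ w.lo) :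
    (Block.mk p n).Same mem mem' := by
  have ho := h.block_off hb
  apply Block.Same.of_sameExcept hs
  intro w hw
  have := hws w hw
  simp only
  omega

/-! ### (c) From the machine's tests to `Fits` -/

/-- `setup_temp_malloc`: FIX A's first test passed (`esi ≤ 0x7ffffff8` unsigned) and the compiled exact-fit test
`T - r8 sz - 31 ≤ S` is not taken ⇒ the request fits; the machine's rounding is `r8`. -/
example (h : ArenaOK A others mem f) (sz : BitVec 32) (h1 : sz.toNat ≤ 0x7FFFFFF8)
    (h3 : ¬ ((A.T : Int) - r8 sz.toNat - 31 ≤ A.S)) :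
    A.Fits sz.toNat ∧ ((sz + 7#32) &&& 0xFFFFFFF8#32).toNat = r8 sz.toNat ∧ r8 sz.toNat + 32 ≤ A.T := by
  have hb := h.bounds
  have hfit := (A.fits_iff_compiled sz.toNat).mpr h3
  refine ⟨hfit, r8_bv sz h1, ?_⟩
  unfold Arena.Fits at hfit
  omega

/-- Why the compiled tests compare true integers: once the guard `T - S < sz` is not taken (`0 ≤ sz ≤ T - S ≤ B00000H`), none of the
32-bit results `sz + 7`, `S + r8 sz + 32`, `T - r8 sz - 31`, `T - (r8 sz + 32)` wraps. -/
example (h : ArenaOK A others mem f) (n : Nat) (h2 : ¬ ((A.T : Int) - A.S < n)) :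
    n + 7 < 2 ^ 31 ∧ A.S + r8 n + 32 < 2 ^ 31 ∧ -(2 ^ 31 : Int) ≤ (A.T : Int) - r8 n - 31 ∧
      -(2 ^ 31 : Int) ≤ (A.T : Int) - (r8 n + 32) := by
  have hb := h.bounds
  have hr := r8_lt n
  omega

/-- The guard refuses only requests the exact test would refuse too: the function is total, success iff `0 ≤ sz ∧ Fits`. -/
example (n : Nat) (hguard : (A.T : Int) - A.S < n) : ¬ A.Fits n :=
  A.not_fits_of_guard n hguard

/-! ### (d) `setup_malloc` end to end -/

/-- The walk of `setup_malloc(f, n)` on the success path, reduced to its memory effects: pushes below the entry stack pointer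
(one shown), the unchecked store `mov [rbx + 0x80], r15d` of `S' = S + 32 + r8 n`, then `arena_unpoison(B + S + 32, n)`
(`arenaUnpoisonSpec`: `v.mem = unpoisonMem u.mem rdi rsi`). Both layers hold for the final memory, with the new block live. -/
example (h : ArenaOK A others mem f) (hsh : ShadowInv others frames top mem) (hf : 0x100000 ≤ f ∧ f + 1808 ≤ 0xC00000)
    (n : Nat) (hfit : A.Fits n) (sp x : Nat) (hsp : 0x700000 ≤ sp ∧ sp + 8 ≤ 0x800000)
    (hspf : sp + 8 ≤ f ∨ f + 1808 ≤ sp) :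
    let m1 := mem.writeLE (addr sp) 8 x
    let m2 := m1.writeLE (addr (f + Off.stb_vorbis.setup_offset)) 4 (A.pushSetup n).S
    let m3 := unpoisonMem m2 (A.B + A.S + 32) n
    ArenaOK (A.pushSetup n) (A.newSetupObj n :: others) m3 f ∧ ShadowInv (A.newSetupObj n :: others) frames top m3 ∧
      (A.pushSetup n).Block (A.B + (A.S + 32)) n ∧ A.Extends (A.pushSetup n) := by
  intro m1 m2 m3
  have hb := h.bounds
  have hr := r8_lt n
  have hfit' := hfit
  unfold Arena.Fits at hfit'
  have esp : (addr sp).toNat = sp := toNat_addr sp (by omega)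
  have hfacts := h.newSetup_facts n hfit
  have hbase : (A.newSetupObj n).base = A.B + (A.S + 32) := rfl
  have hsize : (A.newSetupObj n).size = n := rfl
  -- AR5 in m1 (the push is elsewhere), in m2 (the store), in m3 (`arena_unpoison` writes shadow bytes only)
  have h5_1 : ArenaFields A m1 f := by
    apply h.AR5.frame (by simp only [voff]; omega)
    simp only [voff]
    exact Mem.EqOn.writeLE _ _ mem (addr sp) 8 x (by omega) (by omega)
  have h5_2 : ArenaFields (A.pushSetup n) m2 f := by
    apply h5_1.store_setup (by simp only [voff]; omega) (A.pushSetup n) rfl rfl rfl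
    show A.S + 32 + r8 n < 2 ^ 31
    omega
  have h5_3 : ArenaFields (A.pushSetup n) m3 f := by
    apply h5_2.frame (by simp only [voff]; omega)
    simp only [voff]
    exact Mem.EqOn.mono (dataSame_unpoisonMem m2 (A.B + A.S + 32) n (by omega) (by omega)) (by omega) (by omega)
  -- the shadow layer in m2 (two stores outside the shadow), then Q0's `unpoison`
  have hsh2 : ShadowInv others frames top m2 := by
    apply ShadowInv.untouched hsh
    have e1 : Mem.EqOn 0xC00000 0xE00000 mem m1 := Mem.EqOn.writeLE _ _ mem (addr sp) 8 x (by omega) (by omega)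
    have ef : (addr (f + Off.stb_vorbis.setup_offset)).toNat = f + 128 := toNat_addr _ (by simp only [voff]; omega)
    have e2 : Mem.EqOn 0xC00000 0xE00000 m1 m2 := Mem.EqOn.writeLE _ _ m1 _ 4 _ (by omega) (by omega)
    exact Mem.EqOn.trans e1 e2
  exact ⟨h.setup_malloc n hfit h5_3, h.shadow_setup_malloc hsh2 n hfit, A.block_pushSetup n, A.extends_pushSetup n⟩

/-! ### (e) LIFO: the pairs P1, P2, P3 of start_decoder's sparse codebooks -/

/-- Ghost level: `lengths` (P1, `entries` bytes), `c->codewords` (P2, `4 * se`), `values` (P3, `4 * se`) are allocated in this order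
and released in the reverse order with the same size expressions: the arena is what it was (SD.4: `temps = []` again). -/
example (entries se : Nat) (h1 : A.Fits entries) (h2 : (A.pushTemp entries).Fits (4 * se))
    (h3 : ((A.pushTemp entries).pushTemp (4 * se)).Fits (4 * se)) :
    let A1 := A.pushTemp entries
    let A2 := A1.pushTemp (4 * se)
    let A3 := A2.pushTemp (4 * se)
    let A4 := A3.withTemp (A3.T + r8 (4 * se) + 32) A2.temps
    let A5 := A4.withTemp (A4.T + r8 (4 * se) + 32) A1.temps
    let A6 := A5.withTemp (A5.T + r8 entries + 32) A.temps
    A6 = A := by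
  intro A1 A2 A3 A4 A5 A6
  have e4 : A4 = A2 := Arena.pushTemp_pop A2 (4 * se) (4 * se) h3 rfl
  have e5 : A5 = A1 := by
    show A4.withTemp (A4.T + r8 (4 * se) + 32) A1.temps = A1
    rw [e4]
    exact Arena.pushTemp_pop A1 (4 * se) (4 * se) h2 rfl
  show A5.withTemp (A5.T + r8 entries + 32) A.temps = A
  rw [e5]
  exact Arena.pushTemp_pop A entries entries h1 rfl

/-- One pair with both layers: `setup_temp_malloc(f, n)` then `setup_temp_free(f, p, sz)` with `r8 sz = r8 n`: `ArenaOK` for the same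
arena and the same list of live objects. (`mem1` … are the memories after each function; AR5 is the worker's, from the stores.) -/
example (h : ArenaOK A others mem f) (n sz : Nat) (hfit : A.Fits n) (hsz : r8 sz = r8 n) (mem1 mem2 : Mem)
    (h5a : ArenaFields (A.pushTemp n) mem1 f) (h5b : ArenaFields A mem2 f) : ArenaOK A others mem2 f := by
  have h1 : ArenaOK (A.pushTemp n) (A.newTempObj n :: others) mem1 f := h.temp_malloc n hfit h5a
  have ht : (A.pushTemp n).temps = (A.T - (r8 n + 32), n) :: A.temps := rfl
  have eA : (A.pushTemp n).withTemp ((A.pushTemp n).T + r8 sz + 32) A.temps = A := A.pushTemp_pop n sz hfit hsz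
  have h2 := h1.temp_free ht sz hsz (mem' := mem2) (by rw [eA]; exact h5b)
  rw [eA] at h2
  have eo : dropObjs [(A.pushTemp n).tempObj (A.T - (r8 n + 32), n)] (A.newTempObj n :: others) = others :=
    dropObjs_cons_self (h.newTemp_not_mem n hfit)
  rw [eo] at h2
  exact h2

/-- `temps = []` ⇒ `T = L`: the removed `assert(f->temp_offset == f->alloc.alloc_buffer_length_in_bytes)` of SD.4. -/
example (h : ArenaOK A others mem f) (ht : A.temps = []) : stb_vorbis.temp_offset mem f = (A.L : Int) := by
  rw [h.AR5.temp, h.T_eq_L_of_nil ht]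

/-! ### (f) Decode time -/

/-- `inverse_mdct`: `save = temp_alloc_save(f)` (= L), `buf2 = temp_alloc(f, 2 * n)` with `2 * n ≤ tmr` (T3), a store into `buf2`,
`temp_alloc_restore(f, save)`: ADO again for the SAME ghost arena and live list. -/
example (h : ADO A others mem f) (n : Nat) (hn : 2 * n ≤ stb_vorbis.temp_memory_required mem f) (mem1 mem2 : Mem)
    (h5a : ArenaFields (A.pushTemp (2 * n)) mem1 f)
    (t1 : stb_vorbis.temp_memory_required mem1 f = stb_vorbis.temp_memory_required mem f)
    (h5b : ArenaFields A mem2 f)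
    (t2 : stb_vorbis.temp_memory_required mem2 f = stb_vorbis.temp_memory_required mem1 f) : ADO A others mem2 f := by
  have hr : r8 (2 * n) ≤ stb_vorbis.temp_memory_required mem f := r8_le_of_le hn h.tmr8
  have hfit := (temp_alloc_ok h hr).1
  have hbusy : ADOBusy (A.pushTemp (2 * n)) (A.newTempObj (2 * n) :: others) mem1 f (2 * n) := h.alloc hr h5a t1
  have eA : (A.pushTemp (2 * n)).withTemp (A.pushTemp (2 * n)).L [] = A := h.roundtrip (2 * n)
  have hdone := hbusy.restore (mem' := mem2) (by rw [eA]; exact h5b) t2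
  rw [eA] at hdone
  have eo : dropObjs [(A.pushTemp (2 * n)).tempObj ((A.pushTemp (2 * n)).T, 2 * n)] (A.newTempObj (2 * n) :: others) = others :=
    dropObjs_cons_self (h.ok.newTemp_not_mem (2 * n) hfit)
  rw [eo] at hdone
  exact hdone

/-- Inside the frame: the check of `buf2[k]`, `4 * k + 4 ≤ 2 * n`, in the outstanding temp block at `B + T`. -/
example {n : Nat} (h : ADOBusy A others mem f (2 * n)) (hsh : ShadowInv others frames top mem) (k : Nat) (hk : 4 * k + 4 ≤ 2 * n) :
    AccessibleSmall mem (A.B + A.T + 4 * k) 4 :=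
  h.ok.tblock_acc_inv hsh h.tblock (by omega) (by omega) (by omega)

/-- `temp_alloc_ok`, all of it: success, the block returned, non-NULL, disjoint from every object that was live. -/
example (h : ADO A others mem f) (n : Nat) (hn : r8 n ≤ stb_vorbis.temp_memory_required mem f) :
    A.Fits n ∧ (A.pushTemp n).TBlock (A.B + (A.T - (r8 n + 32))) n ∧ A.B + (A.T - (r8 n + 32)) ≠ 0 ∧
      (∀ o', o' ∈ others → GranDisj (A.newTempObj n) o') :=
  temp_alloc_ok h hn

/-- `arena_temp_restore(f, p)` in general, the shadow half: all temp blocks go (`p = L`). -/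
example (h : ArenaOK A others mem f) (hsh : ShadowInv others frames top mem) :
    ShadowInv (dropObjs (A.temps.map A.tempObj) others) frames top (poisonMem mem (A.B + A.T) (A.L - A.T)) :=
  h.shadow_temp_restore hsh h.cut_all.1 h.cut_all.2

/-! ### (g) Establishing the layer, and the error state -/

/-- P3, after `vorbis_init`: the theorem's arena, `B = 800000H`, `L = 400000H`; the live objects are the globals, IN and OUT. -/
example (h5 : ArenaFields ⟨0x800000, 0x400000, 0, 0x400000, [], []⟩ mem f)
    (hout : ∀ o, o ∈ others → o.kind ≠ .setup ∧ o.kind ≠ .temp ∧ o.base + o.size ≤ 0x800000) :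
    ArenaOK ⟨0x800000, 0x400000, 0, 0x400000, [], []⟩ others mem f := by
  apply ArenaOK.init 0x800000 0x400000 (by decide) (by decide) h5
  intro o ho
  have := hout o ho
  exact ⟨this.1, this.2.1, Or.inl this.2.2⟩

/-- P5: SD.12 (`S + 1808 + tmr + 64 ≤ T = L`, `temps = []`) ⇒ `vorbis_alloc` succeeds, and after the copy `*f' = p` ADO holds at
the arena copy `f' = B + S + 32`. -/
example (h : ArenaOK A others mem f) (hidle : A.temps = []) (tmr : Nat) (h8 : tmr % 8 = 0)
    (hsd : A.S + Off.sizeof.stb_vorbis + tmr + 64 ≤ A.T) (mem1 mem2 : Mem)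
    (h5a : ArenaFields (A.pushSetup Off.sizeof.stb_vorbis) mem1 f)
    (h5b : ArenaFields (A.pushSetup Off.sizeof.stb_vorbis) mem2 (A.B + (A.S + 32)))
    (htmr : stb_vorbis.temp_memory_required mem2 (A.B + (A.S + 32)) = tmr) :
    ADO (A.pushSetup Off.sizeof.stb_vorbis) (A.newSetupObj Off.sizeof.stb_vorbis :: others) mem2 (A.B + (A.S + 32)) := by
  have hfit := ArenaOK.vorbis_alloc_fits A tmr hsd
  have h1 := h.setup_malloc Off.sizeof.stb_vorbis hfit h5a
  have h2 := h1.move h5b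
  apply ADO.of_vorbis_alloc h2 hidle (h.T_eq_L_of_nil hidle)
  · rw [htmr]
    exact h8
  · rw [htmr]
    exact hsd

/-- SD.ERR: after an error return of start_decoder the setup blocks are still live (`vorbis_deinit`'s loads). -/
example (h : ArenaOK A others mem f) (objs : List Obj) (hsub : ∀ o, o ∈ others → o ∈ objs) (p n : Nat) (hb : A.Block p n) :
    (Block.mk p n).live (Live objs) :=
  h.err.block_live hsub hb

/-! ### No axiom beyond Lean's three -/

#print axioms ArenaOK.setup_malloc
#print axioms ArenaOK.temp_malloc
#print axioms ArenaOK.temp_free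
#print axioms ArenaOK.temp_restore
#print axioms ArenaOK.shadow_temp_free
#print axioms temp_alloc_ok
#print axioms ADOBusy.restore
#print axioms r8_bv

end Vorbis.ArenaTest
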